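-- pv_equiv track=rewrite | github.com/ahmednasr999/opportunity-engine | src/cv_optimizer.py | _detect_sector
-- ===== SOURCE A (Python) =====
-- from typing import Dict, List, Tuple, Optional
--
-- def _detect_sector(keywords: List[str]) -> str:
--     """Detect job sector from keywords"""
--     health_keywords = ["healthcare", "health", "medical", "clinical", "hospital", "patient"]
--     fintech_keywords = ["fintech", "banking", "payments", "financial", "stablecoin"]
--
--     health_count = sum(1 for k in keywords if k.lower() in health_keywords)
--     fintech_count = sum(1 for k in keywords if k.lower() in fintech_keywords)
--
--     if health_count > fintech_count:
--         return "HealthTech"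
--     elif fintech_count > health_count:
--         return "FinTech"
--     return "Technology"
-- ===== SOURCE B (Python) =====
-- def _detect_sector(keywords):
--     """Detect job sector from keywords"""
--     health = {"healthcare", "health", "medical", "clinical", "hospital", "patient"}
--     fintech = {"fintech", "banking", "payments", "financial", "stablecoin"}
--     score = 0
--     for k in keywords:
--         kl = k.lower()
--         if kl in health:
--             score += 1
--         elif kl in fintech:
--             score -= 1
--     if score > 0:
--         return "HealthTech"
--     if score < 0:
--         return "FinTech"
--     return "Technology"
-- ===== Notes on version B (the rewrite author's own statement) =====
-- stated objective: faster
-- what changed: Replaces the two counting comprehensions plus a count comparison by a single pass maintaining one net score (+1 health, -1 fintech, using disjointness of the keyword sets, with set instead of list membership) and returns by the score's sign.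
import Mathlib
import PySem

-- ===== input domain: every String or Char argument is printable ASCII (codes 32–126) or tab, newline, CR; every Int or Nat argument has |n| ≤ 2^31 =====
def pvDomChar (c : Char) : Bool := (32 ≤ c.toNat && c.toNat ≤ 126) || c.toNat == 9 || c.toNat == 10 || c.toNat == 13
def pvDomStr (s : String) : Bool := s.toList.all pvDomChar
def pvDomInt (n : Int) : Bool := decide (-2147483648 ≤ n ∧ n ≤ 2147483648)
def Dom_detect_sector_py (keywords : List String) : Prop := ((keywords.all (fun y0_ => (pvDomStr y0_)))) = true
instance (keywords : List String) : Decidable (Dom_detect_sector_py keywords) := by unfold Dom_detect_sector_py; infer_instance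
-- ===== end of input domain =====

-- B replaces the two counting passes by one net-score pass; same value everywhere (alternative decomposition).

-- ===== PORT A =====
def pvHealthKeywords : List String :=
  ["healthcare", "health", "medical", "clinical", "hospital", "patient"]
def pvFintechKeywords : List String :=
  ["fintech", "banking", "payments", "financial", "stablecoin"]

def detect_sector_py (keywords : List String) : String :=
  let health_count : Int :=
    (keywords.map (fun k => if PySem.Str.lower k ∈ pvHealthKeywords then (1 : Int) else 0)).sum
  let fintech_count : Int :=
    (keywords.map (fun k => if PySem.Str.lower k ∈ pvFintechKeywords then (1 : Int) else 0)).sum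
  if health_count > fintech_count then "HealthTech"
  else if fintech_count > health_count then "FinTech"
  else "Technology"

-- ===== PORT B =====
def detect_sector_py_alt (keywords : List String) : String :=
  let score : Int := keywords.foldl (fun s k =>
    let kl := PySem.Str.lower k
    if kl ∈ pvHealthKeywords then s + 1
    else if kl ∈ pvFintechKeywords then s - 1
    else s) 0
  if score > 0 then "HealthTech"
  else if score < 0 then "FinTech"
  else "Technology"

-- ===== PRECONDITION & SPEC =====
def Spec_detect_sector_py (keywords : List String) (out : String) : Prop := out = detect_sector_py_alt keywords
instance (keywords : List String) (out : String) : Decidable (Spec_detect_sector_py keywords out) := by unfold Spec_detect_sector_py; infer_instance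

-- ===== CLAIM (what is proved, stated in full; the proofs are below) =====
def Claim_equal_detect_sector_py : Prop := ∀ (keywords : List String), Dom_detect_sector_py keywords → Spec_detect_sector_py keywords (detect_sector_py keywords)

-- ===== LEMMAS AND PROOFS =====

-- the two keyword lists are disjoint, so each keyword moves the net score exactly as it moves one of the two counts
theorem pv_keywords_disjoint (l : String) (h1 : l ∈ pvHealthKeywords) (h2 : l ∈ pvFintechKeywords) : False := by
  fin_cases h1 <;> simp [pvFintechKeywords] at h2

-- loop invariant: the net score equals health count minus fintech count, shifted by the accumulator
theorem pv_score_eq (keywords : List String) : ∀ s : Int,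
    keywords.foldl (fun s k =>
      let kl := PySem.Str.lower k
      if kl ∈ pvHealthKeywords then s + 1
      else if kl ∈ pvFintechKeywords then s - 1
      else s) s
    = s + (keywords.map (fun k => if PySem.Str.lower k ∈ pvHealthKeywords then (1 : Int) else 0)).sum
        - (keywords.map (fun k => if PySem.Str.lower k ∈ pvFintechKeywords then (1 : Int) else 0)).sum := by
  induction keywords with
  | nil => intro s; simp
  | cons k ks ih =>
    intro s
    simp only [List.foldl_cons, List.map_cons, List.sum_cons, ih]
    by_cases h1 : PySem.Str.lower k ∈ pvHealthKeywords
    · have h2 : PySem.Str.lower k ∉ pvFintechKeywords := fun h => pv_keywords_disjoint _ h1 h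
      simp [h1, h2]; ring
    · by_cases h2 : PySem.Str.lower k ∈ pvFintechKeywords
      · simp [h1, h2]; ring
      · simp [h1, h2]

-- sign of the net score decides the same branch as comparing the two counts
theorem pv_branch_eq (hc fc : Int) :
    (if hc > fc then "HealthTech" else if fc > hc then "FinTech" else "Technology")
    = (if 0 + hc - fc > 0 then "HealthTech" else if 0 + hc - fc < 0 then "FinTech" else "Technology") := by
  split_ifs <;> first | rfl | omega

-- ===== VERDICT (by name: the statement is the Claim_ definition above) =====
theorem detect_sector_py_spec : Claim_equal_detect_sector_py := by
  intro keywords _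
  show detect_sector_py keywords = detect_sector_py_alt keywords
  unfold detect_sector_py detect_sector_py_alt
  rw [pv_score_eq keywords 0]
  exact pv_branch_eq _ _
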